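-- pv_equiv track=rewrite | github.com/WoodCedar/Vegetation-phenology-fitting-calculation | Vegetation-phenology-fitting-calculation.py | max_rate_number
-- ===== SOURCE A (Python) =====
-- def max_rate_number(li):#返回斜率最大值
--     max = abs(li[1]-li[0])
--     max_index = 1
--     for i in range(2,len(li)):
--         if(abs(li[i]-li[i-1])>max):
--             max = abs(li[i]-li[i-1])
--             max_index=i
--     return  max_index#max,
-- ===== SOURCE B (Python) =====
-- def max_rate_number(li):
--     # Sort the candidate indices by descending absolute consecutive difference;
--     # Python's sort is stable and range(...) is increasing, so order[0] is the
--     # FIRST index with the maximal difference, matching A's tie-breaking.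
--     order = sorted(range(1, len(li)), key=lambda i: -abs(li[i] - li[i - 1]))
--     return order[0]
-- ===== Notes on version B (the rewrite author's own statement) =====
-- stated objective: alternative
-- what changed: Replaces A's single-pass running max/argmax tracking loop with a sort-then-pick algorithm: stably sort the indices 1..len(li)-1 by descending absolute consecutive difference and return the first index; stability over the increasing index range preserves A's first-maximum tie-breaking.
import Mathlib
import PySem

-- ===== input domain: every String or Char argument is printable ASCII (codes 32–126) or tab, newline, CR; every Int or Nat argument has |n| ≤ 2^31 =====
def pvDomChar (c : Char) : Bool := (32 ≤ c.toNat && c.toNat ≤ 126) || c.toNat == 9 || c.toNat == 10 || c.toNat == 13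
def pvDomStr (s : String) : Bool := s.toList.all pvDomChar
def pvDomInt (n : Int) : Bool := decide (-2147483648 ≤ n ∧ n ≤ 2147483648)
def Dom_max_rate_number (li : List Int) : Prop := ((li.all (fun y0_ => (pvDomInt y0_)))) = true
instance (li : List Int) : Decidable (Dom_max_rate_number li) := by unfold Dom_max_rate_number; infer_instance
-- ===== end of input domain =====

-- B replaces A's running max/argmax tracking loop by a sort-then-pick algorithm:
-- stably sort the indices 1..len-1 by descending absolute consecutive difference
-- and return the first; stability preserves A's first-maximum tie-breaking.

-- ===== PORT A =====
-- literal port of A: running max of |li[i]-li[i-1]| with its index, loop over range(2, len(li))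
def max_rate_number (li : List Int) : Int :=
  let max0 : Int := |PySem.List.pyGetD li 1 0 - PySem.List.pyGetD li 0 0|
  let st := (PySem.List.pyRange 2 (li.length : Int) 1).foldl
    (fun (s : Int × Int) i =>
      if |PySem.List.pyGetD li i 0 - PySem.List.pyGetD li (i - 1) 0| > s.1 then
        (|PySem.List.pyGetD li i 0 - PySem.List.pyGetD li (i - 1) 0|, i)
      else s)
    (max0, 1)
  st.2

-- ===== PORT B =====
-- literal port of Source B: stable sort of range(1, len(li)) by key -|li[i]-li[i-1]|, then order[0]
def max_rate_number_alt (li : List Int) : Int :=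
  let order := PySem.List.sorted (PySem.List.pyRange 1 (li.length : Int) 1)
    (fun i => -|PySem.List.pyGetD li i 0 - PySem.List.pyGetD li (i - 1) 0|)
  match PySem.List.pyGet? order 0 with
  | some x => x
  | none => 0

-- ===== PRECONDITION & SPEC =====
-- A accesses li[1]-li[0] unconditionally: for lists of length < 2 A raises IndexError
-- (B's order[0] raises IndexError there too)
def Pre_max_rate_number (li : List Int) : Prop := 2 ≤ li.length
instance (li : List Int) : Decidable (Pre_max_rate_number li) := by
  unfold Pre_max_rate_number; infer_instance

def pvWitness_max_rate_number : List Int := [3, 1, 7]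

def Spec_max_rate_number (li : List Int) (out : Int) : Prop := out = max_rate_number_alt li
instance (li : List Int) (out : Int) : Decidable (Spec_max_rate_number li out) := by
  unfold Spec_max_rate_number; infer_instance

-- ===== CLAIM (what is proved, stated in full; the proofs are below) =====
def Claim_equal_max_rate_number : Prop :=
  ∀ (li : List Int), Dom_max_rate_number li → Pre_max_rate_number li →
    Spec_max_rate_number li (max_rate_number li)

-- ===== LEMMAS AND PROOFS =====

-- A's fused (value, index) fold carries the value of its index: it is the plain
-- index fold 'keep i when f i > f m' paired with f of the result
theorem pvPairFold (f : Int → Int) (l : List Int) :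
    ∀ m : Int,
      l.foldl (fun (s : Int × Int) i => if f i > s.1 then (f i, i) else s) (f m, m)
        = (f (l.foldl (fun m i => if f i > f m then i else m) m),
           l.foldl (fun m i => if f i > f m then i else m) m) := by
  induction l with
  | nil => intro m; simp
  | cons x t ih =>
    intro m
    simp only [List.foldl_cons]
    by_cases h : f x > f m
    · rw [if_pos h, if_pos h]; exact ih x
    · rw [if_neg h, if_neg h]; exact ih m

-- the head of a stable insertion-sort fold over a nonempty accumulator is the
-- running 'strictly-better replaces' fold over the heads
theorem pvHeadFold (before : Int → Int → Bool) (l : List Int) :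
    ∀ (h : Int) (t : List Int),
      (l.foldl (fun acc x => PySem.List.insertBy before x acc) (h :: t)).head?
        = some (l.foldl (fun m x => if before x m then x else m) h) := by
  induction l with
  | nil => intro h t; simp
  | cons x l ih =>
    intro h t
    simp only [List.foldl_cons]
    by_cases hb : before x h
    · rw [show PySem.List.insertBy before x (h :: t) = x :: h :: t by
        simp [PySem.List.insertBy, hb]]
      rw [if_pos hb]
      exact ih x (h :: t)
    · rw [show PySem.List.insertBy before x (h :: t)
            = h :: PySem.List.insertBy before x t by
        simp [PySem.List.insertBy, hb]]
      rw [if_neg hb]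
      exact ih h (PySem.List.insertBy before x t)

theorem max_rate_number_spec : Claim_equal_max_rate_number := by
  intro li _ hpre
  unfold Pre_max_rate_number at hpre
  unfold Spec_max_rate_number max_rate_number max_rate_number_alt
  set n : Int := (li.length : Int) with hn
  set f : Int → Int := fun i => |PySem.List.pyGetD li i 0 - PySem.List.pyGetD li (i - 1) 0|
    with hf
  -- split the index range: range(1, n) = 1 :: range(2, n)
  have hsplit : PySem.List.pyRange 1 n 1 = 1 :: PySem.List.pyRange 2 n 1 := by
    rw [PySem.List.pyRange_one_cons (by omega)]; norm_num
  -- B's sort as a fold of insertBy, with [1] as the accumulator after the first step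
  have hins1 : PySem.List.insertBy
      (fun a b => decide ((fun i => -(f i)) a < (fun i => -(f i)) b)) 1 ([] : List Int)
      = [1] := by
    simp [PySem.List.insertBy]
  have hsortfold :
      PySem.List.sorted (PySem.List.pyRange 1 n 1) (fun i => -(f i))
        = (PySem.List.pyRange 2 n 1).foldl
            (fun acc x => PySem.List.insertBy
              (fun a b => decide (-(f a) < -(f b))) x acc) [1] := by
    rw [PySem.List.sorted_eq_foldl_insertBy, hsplit]
    simp only [List.foldl_cons]
    rw [hins1]
  -- head of B's sorted list = the running-first-argmax fold
  have hhead :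
      (PySem.List.sorted (PySem.List.pyRange 1 n 1) (fun i => -(f i))).head?
        = some ((PySem.List.pyRange 2 n 1).foldl
            (fun m x => if (-(f x) < -(f m) : Prop) then x else m) 1) := by
    rw [hsortfold]
    have := pvHeadFold (fun a b => decide (-(f a) < -(f b))) (PySem.List.pyRange 2 n 1) 1 []
    simpa using this
  -- the two folds compute the same index
  have hsame :
      (PySem.List.pyRange 2 n 1).foldl (fun m x => if (-(f x) < -(f m) : Prop) then x else m) 1
        = (PySem.List.pyRange 2 n 1).foldl (fun m i => if f i > f m then i else m) 1 := by
    apply PySem.List.foldl_congr_mem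
    intro m x _
    have : ((-(f x) < -(f m)) : Prop) ↔ f x > f m := by constructor <;> intro h <;> omega
    by_cases h : f x > f m
    · rw [if_pos (this.mpr h), if_pos h]
    · rw [if_neg (fun hc => h (this.mp hc)), if_neg h]
  -- restate the goal with the shared difference function f (defeq: zeta/let reduction)
  show (List.foldl (fun (s : Int × Int) i => if f i > s.1 then (f i, i) else s) (f 1, 1)
          (PySem.List.pyRange 2 n 1)).2
      = match PySem.List.pyGet?
          (PySem.List.sorted (PySem.List.pyRange 1 n 1) (fun i => -(f i))) 0 with
        | some x => x
        | none => 0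
  rw [pvPairFold f (PySem.List.pyRange 2 n 1) 1]
  -- unpack B's match on pyGet? … 0 = head?
  rw [hsame] at hhead
  cases hord : PySem.List.sorted (PySem.List.pyRange 1 n 1) (fun i => -(f i)) with
  | nil => rw [hord] at hhead; simp at hhead
  | cons m t =>
    rw [hord] at hhead
    simp only [List.head?_cons, Option.some.injEq] at hhead
    simp [PySem.List.pyGet?, PySem.List.pyIdx?, hhead]

-- ===== VERDICT (by name: the statement is the Claim_ definition above) =====
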